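-- pv_equiv track=rewrite | github.com/pinti-zh/depot-charging-optimization | src/depot_charging_optimization/scripts/plotting.py | get_axes_shape
-- ===== SOURCE A (Python) =====
-- def get_axes_shape(n):
--     h, w = 0, 0
--     while w * h < n:
--         w += 1
--         if w * h >= n:
--             return h, w
--         h += 1
--     return h, w
-- ===== SOURCE B (Python) =====
-- def get_axes_shape(n):
--     if n <= 0:
--         return 0, 0
--     # binary search the smallest w with w*w >= n; invariant lo*lo < n <= hi*hi
--     lo, hi = 0, n
--     while lo + 1 < hi:
--         mid = (lo + hi) // 2
--         if mid * mid >= n: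
--             hi = mid
--         else:
--             lo = mid
--     w = hi
--     h = w - 1 if (w - 1) * w >= n else w
--     return h, w
-- ===== Notes on version B (the rewrite author's own statement) =====
-- stated objective: faster
-- what changed: Replaces the incremental grow-w-then-h loop (O(sqrt n) iterations) by a binary search for the smallest w with w*w >= n, then picks h = w-1 or w by one comparison.
import Mathlib
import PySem

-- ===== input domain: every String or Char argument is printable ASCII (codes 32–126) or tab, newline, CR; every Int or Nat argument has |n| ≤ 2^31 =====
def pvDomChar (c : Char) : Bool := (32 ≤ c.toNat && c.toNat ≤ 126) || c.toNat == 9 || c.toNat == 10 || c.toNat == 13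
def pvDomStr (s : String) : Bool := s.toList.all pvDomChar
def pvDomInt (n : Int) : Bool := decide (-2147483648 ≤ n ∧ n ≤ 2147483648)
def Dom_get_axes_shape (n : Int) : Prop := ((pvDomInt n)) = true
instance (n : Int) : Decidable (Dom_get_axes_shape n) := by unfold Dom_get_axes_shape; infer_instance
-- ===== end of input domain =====

-- B replaces A's incremental grow loop by a binary search for the smallest w with w*w ≥ n (faster: fewer iterations).

-- ===== PORT A =====
-- A's while loop: h and w start at 0 and only ever grow by 1, so they are kept as Nat
-- loop state (compared with n as Int, exactly as Python compares); the mid-loop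
-- 'return h, w' after 'w += 1' is the first branch.
def pvLoopA (n : Int) (h w : Nat) : Int × Int :=
  if ((w : Int) * h < n) then
    if ((w : Int) + 1) * h ≥ n then ((h : Int), (w : Int) + 1)
    else pvLoopA n (h + 1) (w + 1)
  else ((h : Int), (w : Int))
termination_by (n - (w : Int) * h).toNat
decreasing_by
  rename_i hlt _
  have : ((w : Int) + 1) * ((h : Int) + 1) = (w : Int) * h + w + h + 1 := by ring
  push_cast
  omega

def get_axes_shape (n : Int) : Int × Int := pvLoopA n 0 0

-- ===== PORT B =====
-- binary search: invariant lo*lo < n ≤ hi*hi; returns hi when lo + 1 ≥ hi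
def pvBsearch (n lo hi : Int) : Int :=
  if lo + 1 < hi then
    let mid := PySem.Int.floordiv (lo + hi) 2
    if mid * mid ≥ n then pvBsearch n lo mid
    else pvBsearch n mid hi
  else hi
termination_by (hi - lo).toNat
decreasing_by
  · rename_i hc _
    have := PySem.Int.floordiv_two_mid_bounds (lo := lo + 1) (hi := hi - 1) (by omega)
    have h2 : lo + 1 + (hi - 1) = lo + hi := by ring
    rw [h2] at this
    omega
  · rename_i hc _
    have := PySem.Int.floordiv_two_mid_bounds (lo := lo + 1) (hi := hi - 1) (by omega)
    have h2 : lo + 1 + (hi - 1) = lo + hi := by ring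
    rw [h2] at this
    omega

def get_axes_shape_alt (n : Int) : Int × Int :=
  if n ≤ 0 then (0, 0)
  else
    let w := pvBsearch n 0 n
    let h := if (w - 1) * w ≥ n then w - 1 else w
    (h, w)

-- ===== PRECONDITION & SPEC =====
def Spec_get_axes_shape (n : Int) (out : Int × Int) : Prop := out = get_axes_shape_alt n
instance (n : Int) (out : Int × Int) : Decidable (Spec_get_axes_shape n out) := by unfold Spec_get_axes_shape; infer_instance

-- ===== CLAIM (what is proved, stated in full; the proofs are below) =====
def Claim_equal_get_axes_shape : Prop := ∀ (n : Int), Dom_get_axes_shape n → Spec_get_axes_shape n (get_axes_shape n)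

-- ===== LEMMAS AND PROOFS =====

-- the binary search returns the least w ≥ 1 with n ≤ w*w, given a valid bracket
theorem pvBsearch_char (n lo hi : Int) (hlo : 0 ≤ lo) (hlon : lo * lo < n)
    (hhin : n ≤ hi * hi) (hlh : lo < hi) :
    (pvBsearch n lo hi - 1) * (pvBsearch n lo hi - 1) < n ∧
      n ≤ pvBsearch n lo hi * pvBsearch n lo hi ∧ 1 ≤ pvBsearch n lo hi := by
  fun_induction pvBsearch n lo hi with
  | case1 lo hi hc mid hge ih =>
      have hmid := PySem.Int.floordiv_two_mid_bounds (lo := lo + 1) (hi := hi - 1) (by omega)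
      have h2 : lo + 1 + (hi - 1) = lo + hi := by ring
      rw [h2] at hmid
      exact ih hlo hlon hge (by omega)
  | case2 lo hi hc mid hge ih =>
      have hmid := PySem.Int.floordiv_two_mid_bounds (lo := lo + 1) (hi := hi - 1) (by omega)
      have h2 : lo + 1 + (hi - 1) = lo + hi := by ring
      rw [h2] at hmid
      exact ih (by omega) (by omega) hhin (by omega)
  | case3 lo hi hc =>
      have hhi : hi = lo + 1 := by omega
      subst hhi
      refine ⟨by simpa using hlon, hhin, by omega⟩

-- A's loop, started at h = w = k with k*k < n, lands on (w-1 or w, w) for the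
-- unique w characterised above
theorem pvLoopA_char (n : Int) (h w : Nat) (W : Int)
    (hw1 : (W - 1) * (W - 1) < n) (hw2 : n ≤ W * W) :
    h = w → (w : Int) * w < n → (w : Int) < W →
    pvLoopA n h w = ((if (W - 1) * W ≥ n then W - 1 else W), W) := by
  fun_induction pvLoopA n h w with
  | case1 h' w' hc hret =>
      intro heq hk hkw
      subst heq
      -- returned mid-loop: n ≤ (w'+1)*w', so W = w'+1 and the if picks W-1 = w'
      have hwk : W = (h' : Int) + 1 := by nlinarith
      rw [if_pos (by rw [hwk]; nlinarith)]
      rw [hwk]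
      norm_num
  | case2 h' w' hc hret ih =>
      intro heq hk hkw
      subst heq
      by_cases hnext : ((h' : Int) + 1) * ((h' : Int) + 1) < n
      · have hkw' : ((h' : Int) + 1) < W := by nlinarith
        have := ih rfl (by push_cast; exact_mod_cast hnext) (by exact_mod_cast hkw')
        push_cast at this ⊢
        exact this
      · -- next guard fails: the recursive call returns immediately with (w'+1, w'+1)
        have hwk : W = (h' : Int) + 1 := by nlinarith
        rw [pvLoopA]
        rw [if_neg (by push_cast; omega)]
        have hlt : ¬ ((W - 1) * W ≥ n) := by rw [hwk]; nlinarith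
        rw [if_neg hlt, hwk]
        norm_num
  | case3 h' w' hc =>
      intro heq hk hkw
      subst heq
      exact absurd hk hc

-- ===== VERDICT (by name: the statement is the Claim_ definition above) =====
theorem get_axes_shape_spec : Claim_equal_get_axes_shape := by
  intro n _
  unfold Spec_get_axes_shape get_axes_shape get_axes_shape_alt
  by_cases hn : n ≤ 0
  · rw [if_pos hn, pvLoopA, if_neg (by push_cast; omega)]
    norm_num
  · rw [if_neg hn]
    have hb := pvBsearch_char n 0 n (by omega) (by omega) (by nlinarith) (by omega)
    obtain ⟨h1, h2, h3⟩ := hb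
    have := pvLoopA_char n 0 0 (pvBsearch n 0 n) h1 h2 rfl (by push_cast; omega) (by push_cast; omega)
    simpa using this
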